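-- pv_equiv track=rewrite | github.com/vovij/chrome_extension | experiments/utils.py | tokenize_title
-- ===== SOURCE A (Python) =====
-- def tokenize_title(t):
--     if not t: return []
--     t = t.lower()
--     buf = []
--     for ch in t:
--         buf.append(ch if (ch.isalnum() or ch.isspace()) else " ")
--     toks = [tok for tok in "".join(buf).split() if len(tok) > 1]
--     return toks
-- ===== SOURCE B (Python) =====
-- def tokenize_title(t):
--     if not t: return []
--     toks = []
--     cur = []
--     for ch in t.lower():
--         if ch.isalnum():
--             cur.append(ch)
--         elif cur:
--             toks.append("".join(cur))
--             cur = []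
--     if cur:
--         toks.append("".join(cur))
--     return [tok for tok in toks if len(tok) > 1]
-- ===== Notes on version B (the rewrite author's own statement) =====
-- stated objective: alternative
-- what changed: Replaces A's build-a-blanked-copy-then-str.split pipeline with a single-pass state machine that accumulates maximal alphanumeric runs directly, flushing the current token at each non-alphanumeric character.
import Mathlib
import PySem

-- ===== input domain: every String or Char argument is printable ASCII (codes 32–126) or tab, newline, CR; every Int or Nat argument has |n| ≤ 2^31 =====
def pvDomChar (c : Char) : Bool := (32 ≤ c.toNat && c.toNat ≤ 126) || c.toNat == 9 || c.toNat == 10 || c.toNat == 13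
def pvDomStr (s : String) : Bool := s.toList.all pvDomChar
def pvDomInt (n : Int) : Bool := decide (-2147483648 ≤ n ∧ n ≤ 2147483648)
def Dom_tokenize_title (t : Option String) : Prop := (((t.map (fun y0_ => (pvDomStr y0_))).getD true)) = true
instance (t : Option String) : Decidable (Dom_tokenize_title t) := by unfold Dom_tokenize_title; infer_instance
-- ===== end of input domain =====

-- B replaces A's blank-out-then-str.split pipeline by a single-pass state machine over the
-- characters (same asymptotic cost; alternative decomposition).


-- ===== PORT A =====
-- the body of A's append: 'ch if (ch.isalnum() or ch.isspace()) else " "'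
def pvRepl (ch : Char) : Char :=
  if PySem.Chars.isalnum ch || PySem.Chars.isspace ch then ch else ' '

def tokenize_title (t : Option String) : List String :=
  match t with
  | none => []
  | some s =>
    if s.toList = [] then []
    else
      let cs := PySem.Chars.lower s.toList
      let buf := cs.foldl (fun acc ch => acc ++ [pvRepl ch]) []
      ((PySem.Chars.split₀ buf).filter (fun tok => tok.length > 1)).map String.ofList

-- ===== PORT B =====
-- B's loop body: extend the current run on an alnum char, otherwise flush it (if non-empty)
def pvStep (st : List (List Char) × List Char) (ch : Char) : List (List Char) × List Char :=
  if PySem.Chars.isalnum ch then (st.1, st.2 ++ [ch])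
  else if st.2 = [] then st else (st.1 ++ [st.2], [])

def tokenize_title_alt (t : Option String) : List String :=
  match t with
  | none => []
  | some s =>
    if s.toList = [] then []
    else
      let cs := PySem.Chars.lower s.toList
      let st := cs.foldl pvStep ([], [])
      let toks := if st.2 = [] then st.1 else st.1 ++ [st.2]
      (toks.filter (fun tok => tok.length > 1)).map String.ofList

-- ===== PRECONDITION & SPEC =====
def Spec_tokenize_title (t : Option String) (out : List String) : Prop := out = tokenize_title_alt t
instance (t : Option String) (out : List String) : Decidable (Spec_tokenize_title t out) := by unfold Spec_tokenize_title; infer_instance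

-- ===== CLAIM (what is proved, stated in full; the proofs are below) =====
def Claim_equal_tokenize_title : Prop := ∀ (t : Option String), Dom_tokenize_title t → Spec_tokenize_title t (tokenize_title t)

-- ===== LEMMAS AND PROOFS =====

-- an alphanumeric character is never whitespace
lemma pv_alnum_not_space (c : Char) (h : PySem.Chars.isalnum c = true) :
    PySem.Chars.isspace c = false := by
  simp only [PySem.Chars.isalnum, PySem.Chars.isalpha, PySem.Chars.isupper, PySem.Chars.islower,
    PySem.Chars.isdigit, PySem.Chars.isspace, Char.le_def, UInt32.le_iff_toNat_le,
    Char.toNat_val, Bool.or_eq_true, Bool.and_eq_true, decide_eq_true_eq,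
    Bool.or_eq_false_iff, Bool.and_eq_false_iff, decide_eq_false_iff_not, not_le,
    show 'A'.toNat = 65 from rfl, show 'Z'.toNat = 90 from rfl,
    show 'a'.toNat = 97 from rfl, show 'z'.toNat = 122 from rfl,
    show '0'.toNat = 48 from rfl, show '9'.toNat = 57 from rfl] at h ⊢
  omega

-- the toks component of B's fold only grows by appending: factor out an initial toks prefix
lemma pv_foldl_step_prefix (cs : List Char) (ts : List (List Char)) (cur : List Char) :
    cs.foldl pvStep (ts, cur) =
      (ts ++ (cs.foldl pvStep ([], cur)).1, (cs.foldl pvStep ([], cur)).2) := by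
  induction cs generalizing ts cur with
  | nil => simp
  | cons c cs ih =>
    simp only [List.foldl_cons, pvStep]
    by_cases ha : PySem.Chars.isalnum c
    · simp only [ha, if_true]
      exact ih ts (cur ++ [c])
    · simp only [ha, Bool.false_eq_true, if_false]
      by_cases hc : cur = []
      · simp only [hc, if_true]
        exact ih ts []
      · simp only [hc, if_false, List.nil_append]
        rw [ih (ts ++ [cur]) [], ih [cur] []]
        simp

-- the core invariant: str.split() of the blanked copy IS B's run-collecting machine
lemma pv_go_machine (cs cur : List Char) (acc : List (List Char)) :
    PySem.Chars.split₀.go (cs.map pvRepl) cur acc =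
      acc.reverse ++
        (let st := cs.foldl pvStep ([], cur.reverse)
         if st.2 = [] then st.1 else st.1 ++ [st.2]) := by
  induction cs generalizing cur acc with
  | nil =>
    simp only [List.map_nil, PySem.Chars.split₀.go, List.foldl_nil]
    by_cases hc : cur = [] <;> simp [hc]
  | cons c cs ih =>
    simp only [List.map_cons, PySem.Chars.split₀.go, List.foldl_cons]
    by_cases ha : PySem.Chars.isalnum c
    · have hs := pv_alnum_not_space c ha
      have hr : pvRepl c = c := by simp [pvRepl, ha]
      rw [hr, hs]
      simp only [Bool.false_eq_true, if_false]
      rw [ih (c :: cur) acc]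
      simp [pvStep, ha]
    · have hs : PySem.Chars.isspace (pvRepl c) = true := by
        by_cases h2 : PySem.Chars.isspace c
        · simp [pvRepl, h2]
        · simp [pvRepl, ha, h2]
          decide
      rw [hs]
      simp only [if_true]
      by_cases hc : cur = []
      · simp only [hc, List.isEmpty_nil, if_true]
        rw [ih [] acc]
        simp [pvStep, ha]
      · have : cur.isEmpty = false := by simp [hc]
        rw [this]
        simp only [Bool.false_eq_true, if_false]
        rw [ih [] (cur.reverse :: acc)]
        have hcr : cur.reverse ≠ [] := by simp [hc]
        simp only [pvStep, ha, Bool.false_eq_true, if_false, if_neg hcr, List.nil_append,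
          List.reverse_nil, List.reverse_cons]
        rw [pv_foldl_step_prefix cs [cur.reverse] []]
        by_cases hz : (cs.foldl pvStep ([], [])).2 = [] <;> simp [hz]

lemma pv_split_eq_machine (cs : List Char) :
    PySem.Chars.split₀ (cs.map pvRepl) =
      (let st := cs.foldl pvStep ([], [])
       if st.2 = [] then st.1 else st.1 ++ [st.2]) := by
  have := pv_go_machine cs [] []
  simpa [PySem.Chars.split₀] using this

-- ===== VERDICT (by name: the statement is the Claim_ definition above) =====
theorem tokenize_title_spec : Claim_equal_tokenize_title := by
  intro t _
  unfold Spec_tokenize_title tokenize_title tokenize_title_alt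
  cases t with
  | none => rfl
  | some s =>
    by_cases h : s.toList = []
    · simp [h]
    · simp only [h, if_false]
      rw [PySem.List.foldl_append_singleton_eq_map, List.nil_append,
        pv_split_eq_machine (PySem.Chars.lower s.toList)]
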